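-- pv_equiv track=rewrite | github.com/karynalysenko/Algorithms | pycharm/blast.py | hits
-- ===== SOURCE A (Python) =====
-- def hits(query_map, sequence):
--     # returns list of tuples where 1st index is from query and 2nd is from seq
--     hits = []
--     for window_query, query_offsets in query_map.items():
--         if window_query in sequence:
--             seq_offset = sequence.find(window_query)
--             while seq_offset != -1:  # because of find()
--                 for query_offset in query_offsets:
--                     hits.append((query_offset, seq_offset))
--                 seq_offset = sequence.find(window_query, seq_offset + 1)  # because while loop and find()
--     return hits
-- ===== SOURCE B (Python) =====
-- def hits(query_map, sequence):
--     # index of the sequence, built lazily once per distinct word length: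
--     # maps each window of that length to the (ascending) list of its start positions,
--     # so each query word costs one O(1) lookup instead of a repeated find() scan
--     n = len(sequence)
--     index = {}  # word length -> {window: [positions]}
--     out = []
--     for w, offs in query_map.items():
--         L = len(w)
--         if L not in index:
--             idx = {}
--             for i in range(n - L + 1):
--                 idx.setdefault(sequence[i:i+L], []).append(i)
--             index[L] = idx
--         for p in index[L].get(w, ()):
--             out.extend((q, p) for q in offs)
--     return out
-- ===== Notes on version B (the rewrite author's own statement) =====
-- stated objective: faster
-- what changed: A's per-word while-loop of repeated sequence.find(word, offset+1) scans is replaced by a dict index mapping every window of the sequence to its start positions, built lazily once per distinct word length, so each query word becomes one O(1) lookup.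
import Mathlib
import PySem

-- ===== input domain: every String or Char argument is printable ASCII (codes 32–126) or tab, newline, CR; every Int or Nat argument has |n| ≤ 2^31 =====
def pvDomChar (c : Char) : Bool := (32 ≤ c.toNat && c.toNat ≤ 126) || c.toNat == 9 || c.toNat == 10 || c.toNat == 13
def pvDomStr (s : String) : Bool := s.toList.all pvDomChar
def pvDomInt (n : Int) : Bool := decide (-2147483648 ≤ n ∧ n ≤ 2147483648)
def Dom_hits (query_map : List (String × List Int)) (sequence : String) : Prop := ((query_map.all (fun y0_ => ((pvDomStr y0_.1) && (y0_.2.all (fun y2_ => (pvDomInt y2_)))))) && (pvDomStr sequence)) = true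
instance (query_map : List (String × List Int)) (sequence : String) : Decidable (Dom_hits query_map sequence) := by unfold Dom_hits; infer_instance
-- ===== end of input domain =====

-- B replaces A's per-word repeated sequence.find() scans by a position index of the
-- sequence's windows, built once per distinct word length and looked up per word; objective: faster.

-- ===== PORT A =====
-- A's `while seq_offset != -1` loop over successive find() results; the fuel
-- argument only makes the recursion total (sequence.length + 2 always suffices,
-- since each step's start index strictly grows — proved in hitsFindLoop_eq below).
def hitsFindLoop (fuel : Nat) (s w : List Char) (offs : List Int) (seqOff : Int) : List (Int × Int) :=
  match fuel with
  | 0 => []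
  | Nat.succ fuel =>
    if seqOff = -1 then []
    else offs.map (fun q => (q, seqOff)) ++
         hitsFindLoop fuel s w offs (PySem.Chars.findFrom s w (seqOff + 1) none)

def hits (query_map : List (String × List Int)) (sequence : String) : List (Int × Int) :=
  query_map.foldl (fun acc wp =>
    if PySem.Str.isIn wp.1 sequence then
      acc ++ hitsFindLoop (sequence.toList.length + 2) sequence.toList wp.1.toList wp.2
               (PySem.Str.find sequence wp.1)
    else acc) []

-- ===== PORT B =====
-- idx = {}; for i in range(n - L + 1): idx.setdefault(sequence[i:i+L], []).append(i)
-- (idx.setdefault(k, []).append(i) is idx[k] = idx.get(k, []) + [i], i.e. Dict.modify)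
def buildIdx (s : List Char) (L : Int) : PySem.Dict (List Char) (List Int) :=
  (PySem.List.pyRange 0 ((s.length : Int) - L + 1) 1).foldl
    (fun idx i => idx.modify (PySem.Chars.slice s (some i) (some (i + L))) [] (· ++ [i]))
    PySem.Dict.empty

def hits_alt (query_map : List (String × List Int)) (sequence : String) : List (Int × Int) :=
  (query_map.foldl (fun st wp =>
    let L : Int := (wp.1.toList.length : Int)
    let index := if st.1.contains L then st.1 else st.1.insert L (buildIdx sequence.toList L)
    (index, st.2 ++ ((index.getD L PySem.Dict.empty).getD wp.1.toList []).flatMap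
              (fun p => wp.2.map (fun q => (q, p)))))
    (PySem.Dict.empty, [])).2

-- ===== PRECONDITION & SPEC =====
def Spec_hits (query_map : List (String × List Int)) (sequence : String) (out : List (Int × Int)) : Prop := out = hits_alt query_map sequence
instance (query_map : List (String × List Int)) (sequence : String) (out : List (Int × Int)) : Decidable (Spec_hits query_map sequence out) := by unfold Spec_hits; infer_instance

-- ===== CLAIM (what is proved, stated in full; the proofs are below) =====
def Claim_equal_hits : Prop := ∀ (query_map : List (String × List Int)) (sequence : String), Dom_hits query_map sequence → Spec_hits query_map sequence (hits query_map sequence)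

-- ===== LEMMAS AND PROOFS =====

-- proof-side abbreviation: the ascending list of window start positions at which w occurs
def windowPositions (s w : List Char) : List Int :=
  (PySem.List.pyRange 0 ((s.length : Int) - (w.length : Int) + 1) 1).filter
    (fun i => PySem.Chars.slice s (some i) (some (i + (w.length : Int))) == w)

-- B's window test: the slice equals w iff w is a prefix of the drop
lemma slice_eq_iff {s w : List Char} {p : Int} (h0 : 0 ≤ p) :
    (PySem.Chars.slice s (some p) (some (p + (w.length : Int))) == w) = true ↔ w <+: s.drop p.toNat := by
  rw [beq_iff_eq, PySem.Chars.slice_eq_listSlice,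
      PySem.List.slice_toNat s h0 (by omega : (0:Int) ≤ p + (w.length:Int))]
  have hn : (p + (w.length:Int)).toNat - p.toNat = w.length := by omega
  rw [hn]
  constructor
  · intro h; rw [List.prefix_iff_eq_take]
    rw [← h]; congr 1
    by_cases hl : w.length ≤ (s.drop p.toNat).length
    · rw [List.length_take]; omega
    · rw [List.take_of_length_le (by omega)] at h; rw [← h]; simp
  · intro h; rw [List.prefix_iff_eq_take] at h
    by_cases hl : w.length ≤ (s.drop p.toNat).length
    · rw [← h]
    · rw [List.take_of_length_le (by omega)] at h ⊢; exact h.symm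

-- membership characterisation of B's window scan
lemma mem_windowPositions {s w : List Char} {p : Int} :
    p ∈ windowPositions s w ↔ 0 ≤ p ∧ p < (s.length : Int) - w.length + 1 ∧ w <+: s.drop p.toNat := by
  unfold windowPositions
  rw [List.mem_filter, PySem.List.mem_pyRange_one]
  constructor
  · rintro ⟨⟨h0, h1⟩, hsl⟩
    exact ⟨h0, h1, (slice_eq_iff h0).1 hsl⟩
  · rintro ⟨h0, h1, hpre⟩
    exact ⟨⟨h0, h1⟩, (slice_eq_iff h0).2 hpre⟩

lemma pyRange_pairwise (b : Int) : ∀ (k : Nat) (a : Int), b - a ≤ k → (PySem.List.pyRange a b 1).Pairwise (· < ·) := by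
  intro k
  induction k with
  | zero => intro a h
            have : PySem.List.pyRange a b 1 = [] := by
              rw [List.eq_nil_iff_forall_not_mem]; intro x hx
              rw [PySem.List.mem_pyRange_one] at hx; omega
            rw [this]; exact List.Pairwise.nil
  | succ k ih =>
    intro a h
    by_cases hab : a < b
    · rw [PySem.List.pyRange_one_cons hab]
      refine List.Pairwise.cons ?_ (ih (a+1) (by omega))
      intro x hx; rw [PySem.List.mem_pyRange_one] at hx; omega
    · have : PySem.List.pyRange a b 1 = [] := by
        rw [List.eq_nil_iff_forall_not_mem]; intro x hx
        rw [PySem.List.mem_pyRange_one] at hx; omega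
      rw [this]; exact List.Pairwise.nil

-- findFrom with a start past the end is -1 (CPython's rule, kept by PySem)
lemma findFrom_of_gt_length {s w : List Char} {start : Int}
    (h : (s.length : Int) < start) : PySem.Chars.findFrom s w start none = -1 := by
  unfold PySem.Chars.findFrom
  dsimp only
  split_ifs <;> first | rfl | omega

-- splitting a strictly sorted list at its least element ≥ start
lemma filter_sorted_split : ∀ {xs : List Int} {start r : Int},
    xs.Pairwise (· < ·) → r ∈ xs → start ≤ r →
    (∀ p ∈ xs, start ≤ p → r ≤ p) →
    xs.filter (fun p => start ≤ p) = r :: xs.filter (fun p => r + 1 ≤ p) := by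
  intro xs
  induction xs with
  | nil => intro _ _ _ hr; simp at hr
  | cons x xs ih =>
    intro start r hp hr hsr hmin
    rcases List.mem_cons.mp hr with rfl | hr'
    · rw [List.filter_cons, List.filter_cons]
      simp only [hsr, decide_true, if_pos]
      have hx : ¬ (r + 1 ≤ r) := by omega
      simp only [hx, decide_false, if_neg, Bool.false_eq_true, not_false_iff]
      congr 1
      apply List.filter_congr
      intro p hpmem
      have : r < p := (List.pairwise_cons.mp hp).1 p hpmem
      simp only [decide_eq_decide]; omega
    · have hx : x < r := (List.pairwise_cons.mp hp).1 r hr'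
      have hxs : ¬ start ≤ x := by
        intro hc; have := hmin x (List.mem_cons_self) hc; omega
      rw [List.filter_cons, List.filter_cons]
      simp only [hxs, decide_false, if_neg, Bool.false_eq_true, not_false_iff]
      have hx2 : ¬ (r + 1 ≤ x) := by omega
      simp only [hx2, decide_false, if_neg, Bool.false_eq_true, not_false_iff]
      exact ih (List.pairwise_cons.mp hp).2 hr' hsr (fun p hp hsp => hmin p (List.mem_cons_of_mem _ hp) hsp)

lemma windowPositions_pairwise (s w : List Char) : (windowPositions s w).Pairwise (· < ·) := by
  unfold windowPositions
  exact List.Pairwise.filter _ (pyRange_pairwise _ ((s.length:Int) - w.length + 1).toNat 0 (by omega))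

-- filter (start ≤ ·) of windowPositions is empty once start is past the end
lemma filter_empty_of_big {s w : List Char} {start : Int} (h : (s.length : Int) < start) :
    (windowPositions s w).filter (fun p => start ≤ p) = [] := by
  rw [List.filter_eq_nil_iff]
  intro p hp
  have := mem_windowPositions.mp hp
  simp only [decide_eq_true_eq]; omega

-- A's find-loop produces exactly B's window positions ≥ start, crossed with offs
lemma hitsFindLoop_eq (s w : List Char) (offs : List Int) :
    ∀ (fuel : Nat) (start : Int), 0 ≤ start → s.length + 1 ≤ fuel + start.toNat →
    hitsFindLoop fuel s w offs (PySem.Chars.findFrom s w start none) =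
      ((windowPositions s w).filter (fun p => start ≤ p)).flatMap
        (fun p => offs.map (fun q => (q, p))) := by
  intro fuel
  induction fuel with
  | zero =>
    intro start h0 hf
    rw [filter_empty_of_big (by omega)]
    rfl
  | succ fuel ih =>
    intro start h0 hf
    by_cases hlen : (s.length : Int) < start
    · rw [filter_empty_of_big hlen, findFrom_of_gt_length hlen]
      simp [hitsFindLoop]
    · have hk : start.toNat ≤ s.length := by omega
      have hcast : (start.toNat : Int) = start := by omega
      by_cases hr : PySem.Chars.findFrom s w start none = -1
      · rw [hr]
        have hno : ¬ w <:+: s.drop start.toNat := by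
          rw [← PySem.Chars.findFrom_natCast_eq_neg_one_iff s w start.toNat hk]
          rw [hcast]; exact hr
        have : (windowPositions s w).filter (fun p => start ≤ p) = [] := by
          rw [List.filter_eq_nil_iff]
          intro p hp hsp
          obtain ⟨hp0, hp1, hpre⟩ := mem_windowPositions.mp hp
          simp only [decide_eq_true_eq] at hsp
          apply hno
          have hdrop : s.drop p.toNat = (s.drop start.toNat).drop (p.toNat - start.toNat) := by
            rw [List.drop_drop]; congr 1; omega
          rw [hdrop] at hpre
          exact hpre.isInfix.trans (List.drop_suffix _ _).isInfix
        rw [this]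
        simp [hitsFindLoop]
      · have hspec := PySem.Chars.findFrom_natCast_spec s w start.toNat hk (by rw [hcast]; exact hr)
        rw [hcast] at hspec
        obtain ⟨hge, hpre, hmin⟩ := hspec
        have hwl := hpre.length_le
        rw [List.length_drop] at hwl
        have heq := PySem.Chars.findFrom_natCast s w start.toNat hk
        rw [hcast] at heq
        have hfle := PySem.Chars.find_le_length (List.drop start.toNat s) w
        rw [List.length_drop] at hfle
        have hrlen : PySem.Chars.findFrom s w start none ≤ (s.length : Int) := by
          by_cases hfneg : PySem.Chars.find (List.drop start.toNat s) w = -1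
          · rw [hfneg, if_pos rfl] at heq; exact absurd heq hr
          · rw [if_neg hfneg] at heq; rw [heq]; omega
        have hr0 : 0 ≤ PySem.Chars.findFrom s w start none := by omega
        have hrmem : PySem.Chars.findFrom s w start none ∈ windowPositions s w := by
          rw [mem_windowPositions]
          refine ⟨hr0, ?_, hpre⟩
          omega
        have hminall : ∀ p ∈ windowPositions s w, start ≤ p → PySem.Chars.findFrom s w start none ≤ p := by
          intro p hp hsp
          obtain ⟨hp0, hp1, hppre⟩ := mem_windowPositions.mp hp
          by_contra hlt
          exact hmin p.toNat (by omega) (by omega) hppre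
        rw [filter_sorted_split (windowPositions_pairwise s w) hrmem hge hminall]
        rw [List.flatMap_cons]
        rw [hitsFindLoop]
        rw [if_neg hr]
        congr 1
        have hA : (0:Int) ≤ PySem.Chars.findFrom s w start none + 1 := by omega
        have hB : s.length + 1 ≤ fuel + (PySem.Chars.findFrom s w start none + 1).toNat := by
          omega
        exact ih (PySem.Chars.findFrom s w start none + 1) hA hB

lemma windowPositions_nil_of_not_isIn {s w : List Char} (h : PySem.Chars.isIn w s = false) :
    windowPositions s w = [] := by
  rw [List.eq_nil_iff_forall_not_mem]
  intro p hp
  obtain ⟨hp0, _, hpre⟩ := mem_windowPositions.mp hp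
  have : PySem.Chars.isIn w s = true :=
    (PySem.Chars.exists_prefix_drop_iff_isIn w s).mp ⟨p.toNat, hpre⟩
  rw [h] at this; exact absurd this (by simp)

-- the per-word contributions agree
lemma word_eq (s w : List Char) (offs : List Int) :
    (if PySem.Chars.isIn w s then
       hitsFindLoop (s.length + 2) s w offs (PySem.Chars.find s w)
     else []) =
    (windowPositions s w).flatMap (fun p => offs.map (fun q => (q, p))) := by
  by_cases h : PySem.Chars.isIn w s
  · rw [if_pos h, ← PySem.Chars.findFrom_zero]
    rw [hitsFindLoop_eq s w offs (s.length + 2) 0 le_rfl (by omega)]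
    congr 1
    rw [List.filter_eq_self]
    intro p hp
    have := (mem_windowPositions.mp hp).1
    simpa using this
  · rw [if_neg h]
    rw [windowPositions_nil_of_not_isIn (by simpa using h)]
    rfl

-- the slice-keyed build loop, read back at key c
lemma getD_buildFold (s : List Char) (L : Int) (c : List Char) :
    ∀ (l : List Int) (d : PySem.Dict (List Char) (List Int)),
    (l.foldl (fun idx i => idx.modify (PySem.Chars.slice s (some i) (some (i + L))) [] (· ++ [i])) d).getD c []
    = d.getD c [] ++ l.filter (fun i => PySem.Chars.slice s (some i) (some (i + L)) == c) := by
  intro l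
  induction l with
  | nil => intro d; simp
  | cons i l ih =>
    intro d
    rw [List.foldl_cons, ih, List.filter_cons]
    rw [PySem.Dict.getD_modify]
    by_cases hc : c = PySem.Chars.slice s (some i) (some (i + L))
    · rw [if_pos hc]
      have : (PySem.Chars.slice s (some i) (some (i + L)) == c) = true := by
        rw [beq_iff_eq]; exact hc.symm
      rw [this, if_pos rfl]
      rw [← hc]
      simp
    · rw [if_neg hc]
      have : (PySem.Chars.slice s (some i) (some (i + L)) == c) = false := by
        rw [beq_eq_false_iff_ne]; exact fun h => hc h.symm
      rw [this]
      simp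

lemma buildIdx_getD (s w : List Char) :
    (buildIdx s ((w.length : Int))).getD w [] = windowPositions s w := by
  unfold buildIdx windowPositions
  rw [getD_buildFold]
  simp

lemma foldB_eq (sequence : String) :
    ∀ (l : List (String × List Int)) (index : PySem.Dict Int (PySem.Dict (List Char) (List Int)))
      (acc : List (Int × Int)),
    (∀ L d, index.get? L = some d → d = buildIdx sequence.toList L) →
    (l.foldl (fun st wp =>
        let L : Int := (wp.1.toList.length : Int)
        let index := if st.1.contains L then st.1 else st.1.insert L (buildIdx sequence.toList L)
        (index, st.2 ++ ((index.getD L PySem.Dict.empty).getD wp.1.toList []).flatMap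
                  (fun p => wp.2.map (fun q => (q, p))))) (index, acc)).2
    = l.foldl (fun acc wp =>
        acc ++ (windowPositions sequence.toList wp.1.toList).flatMap
                 (fun p => wp.2.map (fun q => (q, p)))) acc := by
  intro l
  induction l with
  | nil => intro index acc _; rfl
  | cons wp l ih =>
    intro index acc hinv
    rw [List.foldl_cons, List.foldl_cons]
    have hidx : (if index.contains ((wp.1.toList.length : Int)) then index
                 else index.insert ((wp.1.toList.length : Int)) (buildIdx sequence.toList ((wp.1.toList.length : Int)))).get?
                  ((wp.1.toList.length : Int)) = some (buildIdx sequence.toList ((wp.1.toList.length : Int))) := by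
      by_cases hcont : index.contains ((wp.1.toList.length : Int)) = true
      · rw [if_pos hcont]
        have hs : (index.get? ((wp.1.toList.length : Int))).isSome := by
          rw [← PySem.Dict.contains_eq_isSome_get?]; exact hcont
        obtain ⟨d, hd⟩ := Option.isSome_iff_exists.mp hs
        rw [hd, hinv _ _ hd]
      · rw [if_neg hcont]
        exact PySem.Dict.get?_insert_self _ _ _
    have hinv' : ∀ L d, (if index.contains ((wp.1.toList.length : Int)) then index
                 else index.insert ((wp.1.toList.length : Int)) (buildIdx sequence.toList ((wp.1.toList.length : Int)))).get? L = some d →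
                 d = buildIdx sequence.toList L := by
      intro L d hd
      by_cases hcont : index.contains ((wp.1.toList.length : Int)) = true
      · rw [if_pos hcont] at hd; exact hinv _ _ hd
      · rw [if_neg hcont, PySem.Dict.get?_insert] at hd
        by_cases hL : L = ((wp.1.toList.length : Int))
        · rw [if_pos hL] at hd
          cases hd; rw [hL]
        · rw [if_neg hL] at hd; exact hinv _ _ hd
    simp only []
    rw [ih _ _ hinv']
    congr 2
    rw [PySem.Dict.getD_of_get?_eq_some _ PySem.Dict.empty hidx, buildIdx_getD]

lemma hits_eq_alt (query_map : List (String × List Int)) (sequence : String) :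
    hits query_map sequence = hits_alt query_map sequence := by
  unfold hits hits_alt
  rw [foldB_eq sequence query_map PySem.Dict.empty []
      (by intro L d hd; rw [PySem.Dict.get?_empty] at hd; cases hd)]
  suffices h : ∀ (l : List (String × List Int)) (acc : List (Int × Int)),
      l.foldl (fun acc wp =>
        if PySem.Str.isIn wp.1 sequence then
          acc ++ hitsFindLoop (sequence.toList.length + 2) sequence.toList wp.1.toList wp.2
                   (PySem.Str.find sequence wp.1)
        else acc) acc =
      l.foldl (fun acc wp =>
        acc ++ (windowPositions sequence.toList wp.1.toList).flatMap
                 (fun p => wp.2.map (fun q => (q, p)))) acc from h query_map []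
  intro l
  induction l with
  | nil => intro acc; rfl
  | cons wp l ih =>
    intro acc
    rw [List.foldl_cons, List.foldl_cons, ih]
    congr 1
    rw [← word_eq sequence.toList wp.1.toList wp.2]
    simp only [PySem.Str.isIn_eq, PySem.Str.find_eq]
    split_ifs <;> simp

-- ===== VERDICT (by name: the statement is the Claim_ definition above) =====
theorem hits_spec : Claim_equal_hits := by
  intro query_map sequence _
  unfold Spec_hits
  exact hits_eq_alt query_map sequence
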